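-- pv_equiv track=rewrite | github.com/saketh-n/miracle-technical-assessment | backend/main.py | parse_eudract_text
-- ===== SOURCE A (Python) =====
-- def parse_eudract_text(text):
--     """Parse EudraCT text download into list of trial dicts."""
--     trials = []
--     current_trial = {}
--     current_section = None
--     lines = text.splitlines()
--
--     for line in lines:
--         line = line.strip()
--         if line.startswith("EudraCT Number:"):
--             if current_trial:
--                 trials.append(current_trial)
--             current_trial = {"EudraCT Number": line.split(":", 1)[1].strip()}
--         elif line.startswith("Summary") or line in [
--             "A. Protocol Information",
--             "B. Sponsor Information",
--             "D. IMP Identification",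
--             "E. General Information on the Trial",
--             "F. Population of Trial Subjects",
--             "N. Review by the Competent Authority or Ethics Committee in the country concerned",
--             "P. End of Trial"
--         ]:
--             current_section = line
--         elif line and ':' in line:
--             key, value = line.split(":", 1)
--             key = key.strip()
--             value = value.strip()
--             current_trial[key] = value
--         elif line and current_trial:
--             last_key = list(current_trial.keys())[-1]
--             current_trial[last_key] += " " + line
--
--     if current_trial:
--         trials.append(current_trial)
--
--     return trials
-- ===== SOURCE B (Python) =====
-- SECTION_HEADERS = frozenset([
--     "A. Protocol Information",
--     "B. Sponsor Information",
--     "D. IMP Identification",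
--     "E. General Information on the Trial",
--     "F. Population of Trial Subjects",
--     "N. Review by the Competent Authority or Ethics Committee in the country concerned",
--     "P. End of Trial",
-- ])
--
--
-- def _build_trial(trial, body):
--     """Fold the (already stripped) body lines of one block into a trial dict."""
--     for line in body:
--         if line.startswith("Summary") or line in SECTION_HEADERS:
--             continue  # section header: no effect on the output
--         if line and ":" in line:
--             key, value = line.split(":", 1)
--             trial[key.strip()] = value.strip()
--         elif line and trial:
--             last_key = next(reversed(trial))
--             trial[last_key] += " " + line
--     return trial
--
--
-- def parse_eudract_text(text):
--     """Parse EudraCT text download into list of trial dicts."""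
--     lines = [ln.strip() for ln in text.splitlines()]
--     # Phase 1: partition into blocks, a new block at each "EudraCT Number:" line.
--     blocks = [[]]
--     for ln in lines:
--         if ln.startswith("EudraCT Number:"):
--             blocks.append([ln])
--         else:
--             blocks[-1].append(ln)
--     # Phase 2: one dict per block (the leading block only if it is non-empty).
--     trials = []
--     lead = _build_trial({}, blocks[0])
--     if lead:
--         trials.append(lead)
--     for blk in blocks[1:]:
--         trials.append(_build_trial(
--             {"EudraCT Number": blk[0].split(":", 1)[1].strip()}, blk[1:]))
--     return trials
-- ===== Notes on version B (the rewrite author's own statement) =====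
-- stated objective: alternative
-- what changed: A's single stateful line loop (trials list + current dict + dead section variable) is re-decomposed into two phases: partition the stripped lines into per-trial blocks at each 'EudraCT Number:' header (keeping a leading block), then build each trial dict independently with a per-block line classifier.
import Mathlib
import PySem

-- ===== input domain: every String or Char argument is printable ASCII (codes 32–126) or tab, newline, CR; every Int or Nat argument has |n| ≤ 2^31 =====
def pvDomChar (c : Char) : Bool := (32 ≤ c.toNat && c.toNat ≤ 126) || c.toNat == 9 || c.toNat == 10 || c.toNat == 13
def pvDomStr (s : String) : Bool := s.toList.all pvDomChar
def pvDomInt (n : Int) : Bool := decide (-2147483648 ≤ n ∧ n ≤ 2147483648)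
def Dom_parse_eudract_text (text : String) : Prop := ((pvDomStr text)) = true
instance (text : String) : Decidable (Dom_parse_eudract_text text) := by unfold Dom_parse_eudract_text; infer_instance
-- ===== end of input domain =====

-- B re-decomposes A's single stateful line loop into two phases (split the stripped lines
-- into per-trial blocks, then build each trial dict independently); objective: alternative
-- (same asymptotic cost, clearer structure).

-- the seven fixed section-header lines of the Python source
def pvSecLines : List String :=
  ["A. Protocol Information",
   "B. Sponsor Information",
   "D. IMP Identification",
   "E. General Information on the Trial",
   "F. Population of Trial Subjects",
   "N. Review by the Competent Authority or Ethics Committee in the country concerned",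
   "P. End of Trial"]

-- line.split(":", 1)[1].strip(); the fallback "" is unreachable (callers guarantee ':' ∈ line)
def pvAfterColon (line : String) : String :=
  match PySem.Str.splitMax? line ":" 1 with
  | some (_ :: v :: _) => PySem.Str.strip v
  | _ => ""

-- ===== PORT A =====
def parse_eudract_text (text : String) : List (List (String × String)) :=
  let lines := PySem.Str.splitlines text
  let st : List (PySem.Dict String String) × PySem.Dict String String × Option String :=
    lines.foldl (fun st line0 =>
      let line := PySem.Str.strip line0
      if PySem.Str.startswith line "EudraCT Number:" then
        ((if st.2.1.items ≠ [] then st.1 ++ [st.2.1] else st.1),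
         PySem.Dict.empty.insert "EudraCT Number" (pvAfterColon line),
         st.2.2)
      else if PySem.Str.startswith line "Summary" || decide (line ∈ pvSecLines) then
        (st.1, st.2.1, some line)
      else if line ≠ "" ∧ PySem.Str.isIn ":" line then
        (st.1,
         (match PySem.Str.splitMax? line ":" 1 with
          | some (k :: v :: _) => st.2.1.insert (PySem.Str.strip k) (PySem.Str.strip v)
          | _ => st.2.1),
         st.2.2)
      else if line ≠ "" ∧ st.2.1.items ≠ [] then
        (st.1,
         (match PySem.List.pyGet? st.2.1.keys (-1) with   -- list(current_trial.keys())[-1]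
          | some lk => st.2.1.modify lk "" (fun v => v ++ " " ++ line)
          | none => st.2.1),
         st.2.2)
      else st)
      ([], PySem.Dict.empty, none)
  (if st.2.1.items ≠ [] then st.1 ++ [st.2.1] else st.1).map (·.items)

-- ===== PORT B =====
-- one classified line folded into the current trial dict (the loop body of _build_trial)
def pvB_step (trial : PySem.Dict String String) (line : String) : PySem.Dict String String :=
  if PySem.Str.startswith line "Summary" || decide (line ∈ pvSecLines) then trial
  else if line ≠ "" ∧ PySem.Str.isIn ":" line then
    match PySem.Str.splitMax? line ":" 1 with
    | some (k :: v :: _) => trial.insert (PySem.Str.strip k) (PySem.Str.strip v)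
    | _ => trial
  else if line ≠ "" ∧ trial.items ≠ [] then
    match trial.items.getLast? with   -- next(reversed(trial))
    | some lk => trial.modify lk.1 "" (fun v => v ++ " " ++ line)
    | none => trial
  else trial

def pvB_build (trial : PySem.Dict String String) (body : List String) : PySem.Dict String String :=
  body.foldl pvB_step trial

-- blocks[-1].append(ln)
def pvPush (blocks : List (List String)) (ln : String) : List (List String) :=
  match blocks with
  | [] => [[ln]]
  | [b] => [b ++ [ln]]
  | b :: bs => b :: pvPush bs ln

-- one EudraCT block (head line is its "EudraCT Number:" header); [] is unreachable
def pvB_block (blk : List String) : PySem.Dict String String :=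
  match blk with
  | [] => PySem.Dict.empty
  | h :: body => pvB_build (PySem.Dict.empty.insert "EudraCT Number" (pvAfterColon h)) body

def parse_eudract_text_alt (text : String) : List (List (String × String)) :=
  let lines := (PySem.Str.splitlines text).map PySem.Str.strip
  let blocks := lines.foldl (fun bs ln =>
    if PySem.Str.startswith ln "EudraCT Number:" then bs ++ [[ln]] else pvPush bs ln) [[]]
  let trials : List (PySem.Dict String String) :=
    match blocks with
    | [] => []   -- unreachable: blocks starts non-empty
    | lead :: rest =>
      (let t := pvB_build PySem.Dict.empty lead
       if t.items ≠ [] then [t] else []) ++ rest.map pvB_block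
  trials.map (·.items)

-- ===== PRECONDITION & SPEC =====
def Spec_parse_eudract_text (text : String) (out : List (List (String × String))) : Prop := out = parse_eudract_text_alt text
instance (text : String) (out : List (List (String × String))) : Decidable (Spec_parse_eudract_text text out) := by unfold Spec_parse_eudract_text; infer_instance

-- ===== CLAIM (what is proved, stated in full; the proofs are below) =====
def Claim_equal_parse_eudract_text : Prop := ∀ (text : String), Dom_parse_eudract_text text → Spec_parse_eudract_text text (parse_eudract_text text)

-- ===== LEMMAS AND PROOFS =====

-- A's loop body on an already-stripped line
def pvStepA (st : List (PySem.Dict String String) × PySem.Dict String String × Option String)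
    (line : String) : List (PySem.Dict String String) × PySem.Dict String String × Option String :=
  if PySem.Str.startswith line "EudraCT Number:" then
    ((if st.2.1.items ≠ [] then st.1 ++ [st.2.1] else st.1),
     PySem.Dict.empty.insert "EudraCT Number" (pvAfterColon line),
     st.2.2)
  else if PySem.Str.startswith line "Summary" || decide (line ∈ pvSecLines) then
    (st.1, st.2.1, some line)
  else if line ≠ "" ∧ PySem.Str.isIn ":" line then
    (st.1,
     (match PySem.Str.splitMax? line ":" 1 with
      | some (k :: v :: _) => st.2.1.insert (PySem.Str.strip k) (PySem.Str.strip v)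
      | _ => st.2.1),
     st.2.2)
  else if line ≠ "" ∧ st.2.1.items ≠ [] then
    (st.1,
     (match PySem.List.pyGet? st.2.1.keys (-1) with
      | some lk => st.2.1.modify lk "" (fun v => v ++ " " ++ line)
      | none => st.2.1),
     st.2.2)
  else st

def pvFinal (st : List (PySem.Dict String String) × PySem.Dict String String × Option String) :
    List (PySem.Dict String String) :=
  if st.2.1.items ≠ [] then st.1 ++ [st.2.1] else st.1

-- A's remaining output from a current trial and the remaining stripped lines
def pvEmitA (cur : PySem.Dict String String) (ls : List String) : List (PySem.Dict String String) :=
  match ls with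
  | [] => if cur.items ≠ [] then [cur] else []
  | l :: ls =>
    if PySem.Str.startswith l "EudraCT Number:" then
      (if cur.items ≠ [] then [cur] else []) ++
        pvEmitA (PySem.Dict.empty.insert "EudraCT Number" (pvAfterColon l)) ls
    else pvEmitA (pvB_step cur l) ls

-- the block partition as a structural recursion: (lines before the first header, header blocks)
def pvBlocksOf (ls : List String) : List String × List (List String) :=
  match ls with
  | [] => ([], [])
  | l :: ls =>
    if PySem.Str.startswith l "EudraCT Number:" then ([], (l :: (pvBlocksOf ls).1) :: (pvBlocksOf ls).2)
    else (l :: (pvBlocksOf ls).1, (pvBlocksOf ls).2)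

lemma pv_pyGet_neg_one {α : Type} (l : List α) (h : l ≠ []) :
    PySem.List.pyGet? l (-1) = l.getLast? := by
  have hl : 1 ≤ l.length := List.length_pos_iff.mpr h
  have hl' : (1 : Int) ≤ (l.length : Int) := by exact_mod_cast hl
  simp [PySem.List.pyGet?, PySem.List.pyIdx?, show -((l.length : Int)) ≤ -1 by omega,
    List.getLast?_eq_getElem?]

-- A's loop body and B's line classifier agree on non-header lines (up to the dead section state)
lemma pv_stepA_eq_stepB (t : List (PySem.Dict String String)) (c : PySem.Dict String String)
    (s : Option String) (l : String) (hh : ¬ PySem.Str.startswith l "EudraCT Number:" = true) :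
    ∃ s', pvStepA (t, c, s) l = (t, pvB_step c l, s') := by
  unfold pvStepA pvB_step
  rw [if_neg hh]
  split_ifs with h1 h2 h3
  · exact ⟨some l, rfl⟩
  · exact ⟨s, rfl⟩
  · refine ⟨s, ?_⟩
    have hk : PySem.List.pyGet? c.keys (-1) = c.items.getLast?.map Prod.fst := by
      rw [pv_pyGet_neg_one c.keys (by simp [PySem.Dict.keys, h3.2]), PySem.Dict.keys,
        List.getLast?_map]
    rcases hlast : c.items.getLast? with _ | ⟨⟨k, v⟩⟩
    · exact absurd (List.getLast?_eq_none_iff.mp hlast) h3.2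
    · simp [hk, hlast]
  · exact ⟨s, rfl⟩

lemma pv_foldA (ls : List String) :
    ∀ (t : List (PySem.Dict String String)) (c : PySem.Dict String String) (s : Option String),
    pvFinal (List.foldl pvStepA (t, c, s) ls) = t ++ pvEmitA c ls := by
  induction ls with
  | nil =>
    intro t c s
    by_cases h : c.items ≠ [] <;> simp [pvFinal, pvEmitA, h]
  | cons l ls ih =>
    intro t c s
    rw [List.foldl_cons]
    by_cases hh : PySem.Str.startswith l "EudraCT Number:" = true
    · have hstep : pvStepA (t, c, s) l =
          ((if c.items ≠ [] then t ++ [c] else t),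
           PySem.Dict.empty.insert "EudraCT Number" (pvAfterColon l), s) := by
        unfold pvStepA; rw [if_pos hh]
      have hemit : pvEmitA c (l :: ls) = (if c.items ≠ [] then [c] else []) ++
          pvEmitA (PySem.Dict.empty.insert "EudraCT Number" (pvAfterColon l)) ls := by
        simp only [pvEmitA]; rw [if_pos hh]
      rw [hstep, ih, hemit]
      by_cases h : c.items ≠ [] <;> simp [h]
    · obtain ⟨s', hs⟩ := pv_stepA_eq_stepB t c s l hh
      have hemit : pvEmitA c (l :: ls) = pvEmitA (pvB_step c l) ls := by
        simp only [pvEmitA]; rw [if_neg hh]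
      rw [hs, ih, hemit]

-- pushing onto the last block of a non-empty block list
lemma pv_push_eq (bs : List (List String)) (b : List String) (l : String) :
    pvPush (bs ++ [b]) l = bs ++ [b ++ [l]] := by
  induction bs with
  | nil => simp [pvPush]
  | cons x bs ih =>
    cases bs with
    | nil => simp [pvPush]
    | cons y bs => simpa [pvPush] using ih

lemma pv_foldBlocks (ls : List String) :
    ∀ (bs : List (List String)) (b : List String),
    List.foldl (fun bs ln =>
        if PySem.Str.startswith ln "EudraCT Number:" then bs ++ [[ln]] else pvPush bs ln)
      (bs ++ [b]) ls = bs ++ ((b ++ (pvBlocksOf ls).1) :: (pvBlocksOf ls).2) := by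
  induction ls with
  | nil => intro bs b; simp [pvBlocksOf]
  | cons l ls ih =>
    intro bs b
    simp only [List.foldl_cons]
    by_cases hh : PySem.Str.startswith l "EudraCT Number:" = true
    · have hb : pvBlocksOf (l :: ls) =
          ([], (l :: (pvBlocksOf ls).1) :: (pvBlocksOf ls).2) := by
        simp only [pvBlocksOf]; rw [if_pos hh]
      rw [if_pos hh, hb,
        show bs ++ [b] ++ [[l]] = (bs ++ [b]) ++ [[l]] from rfl, ih (bs ++ [b]) [l]]
      simp
    · have hb : pvBlocksOf (l :: ls) =
          (l :: (pvBlocksOf ls).1, (pvBlocksOf ls).2) := by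
        simp only [pvBlocksOf]; rw [if_neg hh]
      rw [if_neg hh, hb, pv_push_eq, ih bs (b ++ [l])]
      simp

-- one classified line never empties a non-empty trial dict
lemma pv_step_ne_nil (c : PySem.Dict String String) (l : String) (h : c.items ≠ []) :
    (pvB_step c l).items ≠ [] := by
  unfold pvB_step
  split_ifs with h1 h2 h3
  · exact h
  · rcases PySem.Str.splitMax? l ":" 1 with _ | ⟨_ | ⟨k, _ | ⟨v, rest⟩⟩⟩ <;>
      simp_all [PySem.Dict.items_insert] <;> split_ifs <;> simp_all
  · rcases c.items.getLast? with _ | lk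
    · exact h
    · simp only [PySem.Dict.modify, PySem.Dict.items_insert]
      split_ifs <;> simp_all
  · exact h

lemma pv_build_ne_nil (body : List String) :
    ∀ (c : PySem.Dict String String), c.items ≠ [] → (pvB_build c body).items ≠ [] := by
  induction body with
  | nil => intro c h; exact h
  | cons l ls ih => intro c h; exact ih _ (pv_step_ne_nil c l h)

-- the glue: A's remaining output is B's per-block output
lemma pv_emit_eq_blocks (ls : List String) :
    ∀ (cur : PySem.Dict String String),
    pvEmitA cur ls =
      (if (pvB_build cur (pvBlocksOf ls).1).items ≠ []
        then [pvB_build cur (pvBlocksOf ls).1] else []) ++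
      ((pvBlocksOf ls).2).map pvB_block := by
  induction ls with
  | nil => intro cur; simp [pvEmitA, pvBlocksOf, pvB_build]
  | cons l ls ih =>
    intro cur
    by_cases hh : PySem.Str.startswith l "EudraCT Number:" = true
    · have hb : pvBlocksOf (l :: ls) =
          ([], (l :: (pvBlocksOf ls).1) :: (pvBlocksOf ls).2) := by
        simp only [pvBlocksOf]; rw [if_pos hh]
      have hemit : pvEmitA cur (l :: ls) = (if cur.items ≠ [] then [cur] else []) ++
          pvEmitA (PySem.Dict.empty.insert "EudraCT Number" (pvAfterColon l)) ls := by
        simp only [pvEmitA]; rw [if_pos hh]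
      have hne : (pvB_build (PySem.Dict.empty.insert "EudraCT Number" (pvAfterColon l))
          (pvBlocksOf ls).1).items ≠ [] := by
        apply pv_build_ne_nil
        simp [PySem.Dict.items_insert]
      rw [hemit, ih, hb]
      simp only [pvB_build] at hne ⊢
      simp [hne, pvB_block, pvB_build]
    · have hb : pvBlocksOf (l :: ls) =
          (l :: (pvBlocksOf ls).1, (pvBlocksOf ls).2) := by
        simp only [pvBlocksOf]; rw [if_neg hh]
      have hemit : pvEmitA cur (l :: ls) = pvEmitA (pvB_step cur l) ls := by
        simp only [pvEmitA]; rw [if_neg hh]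
      rw [hemit, ih, hb]
      simp [pvB_build]

-- ===== VERDICT (by name: the statement is the Claim_ definition above) =====
theorem parse_eudract_text_spec : Claim_equal_parse_eudract_text := by
  intro text _
  show parse_eudract_text text = parse_eudract_text_alt text
  have h1 : parse_eudract_text text =
      (pvEmitA PySem.Dict.empty ((PySem.Str.splitlines text).map PySem.Str.strip)).map (·.items) := by
    have hA := pv_foldA ((PySem.Str.splitlines text).map PySem.Str.strip) [] PySem.Dict.empty none
    simp only [List.nil_append] at hA
    show (pvFinal ((PySem.Str.splitlines text).foldl
        (fun st line0 => pvStepA st (PySem.Str.strip line0))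
        ([], PySem.Dict.empty, none))).map (·.items) = _
    rw [← List.foldl_map (f := PySem.Str.strip) (g := pvStepA)]
    exact congrArg (List.map (·.items)) hA
  have h2 : parse_eudract_text_alt text =
      ((if (pvB_build PySem.Dict.empty
            (pvBlocksOf ((PySem.Str.splitlines text).map PySem.Str.strip)).1).items ≠ []
         then [pvB_build PySem.Dict.empty
            (pvBlocksOf ((PySem.Str.splitlines text).map PySem.Str.strip)).1] else []) ++
       ((pvBlocksOf ((PySem.Str.splitlines text).map PySem.Str.strip)).2).map pvB_block).map
        (·.items) := by
    have hfold := pv_foldBlocks ((PySem.Str.splitlines text).map PySem.Str.strip) [] []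
    simp only [List.nil_append] at hfold
    simp only [parse_eudract_text_alt, hfold]
  rw [h1, h2, pv_emit_eq_blocks]
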